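-- pv_equiv track=rewrite | github.com/surrealier/LLM_Arduino | server/src/agent_mode.py | _pick_split_index
-- ===== SOURCE A (Python) =====
-- def _pick_split_index(text: str, min_idx: int, max_idx: int) -> int:
--     """min/max 범위 내에서 자연스러운 분할 위치 선택"""
--     max_idx = max(0, min(max_idx, len(text) - 1))
--     min_idx = max(0, min(min_idx, max_idx))
--
--     for i in range(max_idx, min_idx - 1, -1):
--         if text[i] in ".?!,;:。！？":
--             return i + 1
--     for i in range(max_idx, min_idx - 1, -1):
--         if text[i].isspace():
--             return i + 1
--     return max_idx + 1
-- ===== SOURCE B (Python) =====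
-- def _pick_split_index(text: str, min_idx: int, max_idx: int) -> int:
--     max_idx = max(0, min(max_idx, len(text) - 1))
--     min_idx = max(0, min(min_idx, max_idx))
--     space = None
--     i = max_idx
--     while i >= min_idx:
--         c = text[i]
--         if c in ".?!,;:。！？":
--             return i + 1
--         if space is None and c.isspace():
--             space = i
--         i -= 1
--     return space + 1 if space is not None else max_idx + 1
-- ===== Notes on version B (the rewrite author's own statement) =====
-- stated objective: alternative
-- what changed: A's two full backward scans (one for punctuation, then a second one for whitespace) are replaced by a single backward while-loop that returns immediately on the first punctuation hit and remembers only the first (highest) whitespace index for the fallback.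
import Mathlib
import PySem

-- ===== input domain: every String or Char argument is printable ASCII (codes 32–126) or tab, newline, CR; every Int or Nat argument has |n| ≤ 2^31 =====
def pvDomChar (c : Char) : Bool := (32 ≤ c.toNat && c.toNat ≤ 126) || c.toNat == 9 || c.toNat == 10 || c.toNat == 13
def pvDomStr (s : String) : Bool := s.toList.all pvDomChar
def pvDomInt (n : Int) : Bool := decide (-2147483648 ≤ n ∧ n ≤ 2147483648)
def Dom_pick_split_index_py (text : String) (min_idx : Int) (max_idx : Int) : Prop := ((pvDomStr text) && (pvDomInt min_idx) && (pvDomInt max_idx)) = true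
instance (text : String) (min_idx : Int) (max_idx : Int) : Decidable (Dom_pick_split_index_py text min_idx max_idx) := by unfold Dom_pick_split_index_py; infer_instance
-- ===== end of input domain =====

-- B replaces A's two full backward scans by ONE backward pass with early return on
-- punctuation and a remembered first-whitespace index (alternative decomposition, same cost).

-- shared character predicates: `c in ".?!,;:。！？"` and `c.isspace()`
def pvIsPunct (c : Char) : Bool := ['.', '?', '!', ',', ';', ':', '。', '！', '？'].contains c
def pvIsSpace (c : Char) : Bool := PySem.Chars.isspace c

-- ===== PORT A =====
-- inside Pre_ (text ≠ "") every scanned index is in range, so `cs.getD i ' '` equals Python's text[i] exactly.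
def pick_split_index_py (text : String) (min_idx : Int) (max_idx : Int) : Int :=
  let cs := text.toList
  let a := max 0 (min max_idx ((cs.length : Int) - 1))
  let b := max 0 (min min_idx a)
  -- range(max_idx, min_idx - 1, -1): the descending indices a, a-1, …, b
  let idxs := (List.range' b.toNat (a.toNat - b.toNat + 1)).reverse
  match idxs.find? (fun i => pvIsPunct (cs.getD i ' ')) with
  | some i => (i : Int) + 1
  | none =>
    match idxs.find? (fun i => pvIsSpace (cs.getD i ' ')) with
    | some i => (i : Int) + 1
    | none => a + 1

-- ===== PORT B =====
-- the while loop: walk the descending indices once; early-return (i+1) on punctuation,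
-- record the first whitespace index seen; `none` means the loop fell through with space = None.
def pvScanB (cs : List Char) : List Nat → Option Nat → Option Int
  | [], none => none
  | [], some j => some ((j : Int) + 1)
  | i :: rest, sp =>
    let c := cs.getD i ' '
    if pvIsPunct c then some ((i : Int) + 1)
    else if sp.isNone && pvIsSpace c then pvScanB cs rest (some i)
    else pvScanB cs rest sp

def pick_split_index_py_alt (text : String) (min_idx : Int) (max_idx : Int) : Int :=
  let cs := text.toList
  let a := max 0 (min max_idx ((cs.length : Int) - 1))
  let b := max 0 (min min_idx a)
  let down := (List.range' b.toNat (a.toNat - b.toNat + 1)).reverse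
  match pvScanB cs down none with
  | some r => r
  | none => a + 1

-- ===== PRECONDITION & SPEC =====
-- Pre_ excludes only the empty string, where Python A (and B) raise IndexError at text[0].
def Pre_pick_split_index_py (text : String) (min_idx : Int) (max_idx : Int) : Prop := text ≠ ""
instance (text : String) (min_idx : Int) (max_idx : Int) : Decidable (Pre_pick_split_index_py text min_idx max_idx) := by unfold Pre_pick_split_index_py; infer_instance
def pvWitness_pick_split_index_py : String × Int × Int := ("ab, cd", 0, 5)

def Spec_pick_split_index_py (text : String) (min_idx : Int) (max_idx : Int) (out : Int) : Prop := out = pick_split_index_py_alt text min_idx max_idx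
instance (text : String) (min_idx : Int) (max_idx : Int) (out : Int) : Decidable (Spec_pick_split_index_py text min_idx max_idx out) := by unfold Spec_pick_split_index_py; infer_instance

-- ===== CLAIM (what is proved, stated in full; the proofs are below) =====
def Claim_equal_pick_split_index_py : Prop := ∀ (text : String) (min_idx : Int) (max_idx : Int), Dom_pick_split_index_py text min_idx max_idx → Pre_pick_split_index_py text min_idx max_idx → Spec_pick_split_index_py text min_idx max_idx (pick_split_index_py text min_idx max_idx)

-- ===== LEMMAS AND PROOFS =====

-- characterisation of the single backward pass in terms of the two first-match scans
theorem pvScanB_eq (cs : List Char) (idxs : List Nat) (sp : Option Nat) :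
    pvScanB cs idxs sp =
      match idxs.find? (fun i => pvIsPunct (cs.getD i ' ')) with
      | some i => some ((i : Int) + 1)
      | none =>
        match sp with
        | some j => some ((j : Int) + 1)
        | none =>
          match idxs.find? (fun i => pvIsSpace (cs.getD i ' ')) with
          | some i => some ((i : Int) + 1)
          | none => none := by
  induction idxs generalizing sp with
  | nil => cases sp <;> rfl
  | cons i rest ih =>
    simp only [pvScanB, List.find?_cons, List.getD]
    by_cases hp : pvIsPunct ((cs[i]?).getD ' ')
    · simp [hp]
    · by_cases hs : pvIsSpace ((cs[i]?).getD ' ')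
      · cases sp <;> simp [hp, hs, ih, Option.isNone]
      · cases sp <;> simp [hp, hs, ih, Option.isNone]

-- reshaping: A's nested matches against B's Option-valued scan result
theorem pvMatchReshape (o1 o2 : Option Nat) (a : Int) :
    (match o1 with
     | some i => (i : Int) + 1
     | none =>
       match o2 with
       | some i => (i : Int) + 1
       | none => a + 1)
    = (match
        (match o1 with
         | some i => some ((i : Int) + 1)
         | none =>
           match o2 with
           | some i => some ((i : Int) + 1)
           | none => none) with
       | some r => r
       | none => a + 1) := by
  cases o1 <;> cases o2 <;> rfl

-- ===== VERDICT (by name: the statement is the Claim_ definition above) =====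
theorem pick_split_index_py_spec : Claim_equal_pick_split_index_py := by
  intro text _min_idx _max_idx _ _
  unfold Spec_pick_split_index_py pick_split_index_py pick_split_index_py_alt
  simp only [pvScanB_eq]
  exact pvMatchReshape _ _ _
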